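-- pv_equiv track=rewrite | github.com/xinhuagu/ScreenPilot | gazefy/detection/grounding_label.py | _match_custom
-- ===== SOURCE A (Python) =====
-- def _match_custom(text: str, classes: list[str]) -> tuple[int | None, str | None]:
--     """Match GroundingDINO output to a custom class list."""
--     text = text.strip().lower()
--     # Exact match
--     for i, cls in enumerate(classes):
--         if text == cls:
--             return i, cls
--     # Partial match
--     for i, cls in enumerate(classes):
--         if cls in text or text in cls:
--             return i, cls
--     return None, None
-- ===== SOURCE B (Python) =====
-- def _match_custom(text: str, classes: list[str]) -> tuple[int | None, str | None]:
--     """Match GroundingDINO output to a custom class list (single pass)."""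
--     text = text.strip().lower()
--     best = None
--     for i, cls in enumerate(classes):
--         if text == cls:
--             return i, cls
--         if best is None and (cls in text or text in cls):
--             best = (i, cls)
--     return best if best is not None else (None, None)
-- ===== Notes on version B (the rewrite author's own statement) =====
-- stated objective: alternative
-- what changed: Replaces A's two sequential scans (exact pass, then partial pass) by a single pass over enumerate(classes) that returns immediately on an exact match and records the first partial candidate in a best variable.
import Mathlib
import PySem

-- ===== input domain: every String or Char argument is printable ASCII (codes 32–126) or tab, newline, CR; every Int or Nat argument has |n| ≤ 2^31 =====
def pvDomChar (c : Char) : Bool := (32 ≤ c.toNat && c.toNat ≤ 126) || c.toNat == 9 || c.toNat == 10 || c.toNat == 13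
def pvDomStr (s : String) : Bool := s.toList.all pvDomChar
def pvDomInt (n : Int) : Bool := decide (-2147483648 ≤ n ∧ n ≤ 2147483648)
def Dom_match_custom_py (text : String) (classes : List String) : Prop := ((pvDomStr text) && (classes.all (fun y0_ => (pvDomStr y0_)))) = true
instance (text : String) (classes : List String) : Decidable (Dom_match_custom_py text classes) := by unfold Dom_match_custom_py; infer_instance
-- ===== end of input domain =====

-- B replaces A's two sequential scans (exact, then partial) by one pass that returns on an exact
-- match and remembers the first partial candidate; same cost, different decomposition.


-- ===== PORT A =====
-- first pass: exact match
def mcExact (t : String) : List String → Nat → Option (Nat × String)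
  | [], _ => none
  | c :: rest, i => if t == c then some (i, c) else mcExact t rest (i + 1)

-- second pass: partial match (cls in text or text in cls)
def mcPartial (t : String) : List String → Nat → Option (Nat × String)
  | [], _ => none
  | c :: rest, i =>
      if PySem.Str.isIn c t || PySem.Str.isIn t c then some (i, c)
      else mcPartial t rest (i + 1)

def match_custom_py (text : String) (classes : List String) : Option Int × Option String :=
  let t := PySem.Str.lower (PySem.Str.strip text)
  match mcExact t classes 0 with
  | some (i, c) => (some (i : Int), some c)
  | none =>
    match mcPartial t classes 0 with
    | some (i, c) => (some (i : Int), some c)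
    | none => (none, none)

-- ===== PORT B =====
-- single pass: return on exact match, record the first partial candidate in `best`
def mcScan (t : String) : List String → Nat → Option (Nat × String) → Option Int × Option String
  | [], _, best =>
      match best with
      | some (i, c) => (some (i : Int), some c)
      | none => (none, none)
  | c :: rest, i, best =>
      if t == c then (some (i : Int), some c)
      else
        let best' :=
          if best.isNone && (PySem.Str.isIn c t || PySem.Str.isIn t c) then some (i, c) else best
        mcScan t rest (i + 1) best'

def match_custom_py_alt (text : String) (classes : List String) : Option Int × Option String :=
  mcScan (PySem.Str.lower (PySem.Str.strip text)) classes 0 none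

-- ===== PRECONDITION & SPEC =====
def Spec_match_custom_py (text : String) (classes : List String) (out : Option Int × Option String) : Prop := out = match_custom_py_alt text classes
instance (text : String) (classes : List String) (out : Option Int × Option String) : Decidable (Spec_match_custom_py text classes out) := by unfold Spec_match_custom_py; infer_instance

-- ===== CLAIM (what is proved, stated in full; the proofs are below) =====
def Claim_equal_match_custom_py : Prop := ∀ (text : String) (classes : List String), Dom_match_custom_py text classes → Spec_match_custom_py text classes (match_custom_py text classes)

-- ===== LEMMAS AND PROOFS =====
-- Invariant of B's single pass: it yields the first exact match if any, else the carried `best`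
-- if set, else the first partial match of the remaining list.
theorem mcScan_spec (t : String) (cs : List String) (i : Nat) (best : Option (Nat × String)) :
    mcScan t cs i best =
      match mcExact t cs i with
      | some (j, c) => (some (j : Int), some c)
      | none =>
        match best with
        | some (j, c) => (some (j : Int), some c)
        | none =>
          match mcPartial t cs i with
          | some (j, c) => (some (j : Int), some c)
          | none => (none, none) := by
  induction cs generalizing i best with
  | nil => cases best <;> simp [mcScan, mcExact, mcPartial]
  | cons c rest ih =>
    by_cases he : t == c
    · simp [mcScan, mcExact, he]
    · by_cases hp : PySem.Str.isIn c t || PySem.Str.isIn t c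
      all_goals simp only [PySem.Str.isIn, Bool.or_eq_true] at hp
      · cases best with
        | none => simp [mcScan, mcExact, mcPartial, he, hp, ih]
        | some p => simp [mcScan, mcExact, he, ih]
      · cases best with
        | none => simp [mcScan, mcExact, mcPartial, he, hp, ih]
        | some p => simp [mcScan, mcExact, he, ih]

-- ===== VERDICT (by name: the statement is the Claim_ definition above) =====
theorem match_custom_py_spec : Claim_equal_match_custom_py := by
  intro text classes _
  unfold Spec_match_custom_py match_custom_py match_custom_py_alt
  rw [mcScan_spec]
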